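-- pv_equiv track=rewrite | github.com/ViniciusDev26/parallel-computing | bfs.py | group_components
-- ===== SOURCE A (Python) =====
-- def group_components(components, num_groups):
--     # Group components into approximately balanced blocks
--     sorted_components = sorted(components, key=len, reverse=True)
--     groups = [[] for _ in range(num_groups)]
--     weights = [0] * num_groups
--
--     for comp in sorted_components:
--         smallest_group = weights.index(min(weights))
--         groups[smallest_group].append(comp)
--         weights[smallest_group] += len(comp)
--
--     return groups
-- ===== SOURCE B (Python) =====
-- def _insert(pairs, p):
--     # insert p into lexicographically sorted pairs, keeping order
--     for j in range(len(pairs)):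
--         if p < pairs[j]:
--             pairs.insert(j, p)
--             return
--     pairs.append(p)
--
--
-- def group_components(components, num_groups):
--     # Keep (weight, group_index) pairs as a sorted list: the lightest group
--     # (ties broken by lowest index) is always at the front; no min/index scan.
--     groups = [[] for _ in range(num_groups)]
--     pairs = [(0, i) for i in range(num_groups)]
--     for comp in sorted(components, key=len, reverse=True):
--         w, i = pairs.pop(0)
--         groups[i].append(comp)
--         _insert(pairs, (w + len(comp), i))
--     return groups
-- ===== Notes on version B (the rewrite author's own statement) =====
-- stated objective: alternative
-- what changed: B maintains the group loads as a lexicographically sorted list of (weight, index) pairs, popping the front for the lightest group and re-inserting the updated pair, instead of A's full min()+index() scan of the weights list each iteration.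
-- outside the precondition, e.g. on group_components([[1]], 0): A raises ValueError, B raises IndexError
import Mathlib
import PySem

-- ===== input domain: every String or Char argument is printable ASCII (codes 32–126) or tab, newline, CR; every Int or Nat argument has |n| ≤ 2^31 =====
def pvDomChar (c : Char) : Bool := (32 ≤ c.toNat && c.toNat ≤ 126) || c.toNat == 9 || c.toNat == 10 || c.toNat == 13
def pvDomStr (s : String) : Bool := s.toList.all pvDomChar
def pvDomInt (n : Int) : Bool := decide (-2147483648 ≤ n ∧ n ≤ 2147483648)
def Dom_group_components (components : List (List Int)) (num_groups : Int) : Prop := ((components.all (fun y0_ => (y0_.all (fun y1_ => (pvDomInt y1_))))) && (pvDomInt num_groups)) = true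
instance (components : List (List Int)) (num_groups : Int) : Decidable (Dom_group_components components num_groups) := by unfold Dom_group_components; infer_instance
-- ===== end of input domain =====

-- B replaces A's per-iteration min()+index() scan of the weights list by a
-- lexicographically sorted list of (weight, group-index) pairs whose front is
-- always the lightest (lowest-index) group; same cost class, different structure.

-- ===== PORT A =====
-- loop body of A: smallest = weights.index(min(weights)); append; add weight
def stepA (st : List (List (List Int)) × List Int) (comp : List Int) :
    List (List (List Int)) × List Int :=
  match PySem.List.min? st.2 (fun x => x) with
  | none => st        -- Python raises ValueError (min of empty); excluded by Pre_
  | some m =>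
    match PySem.List.index? st.2 m with
    | none => st      -- unreachable: m is a member of st.2
    | some j =>
      (st.1.set j ((st.1.getD j []) ++ [comp]),
       st.2.set j ((st.2.getD j 0) + (comp.length : Int)))

def group_components (components : List (List Int)) (num_groups : Int) :
    List (List (List Int)) :=
  let sorted_components := PySem.List.sorted components (fun c => (c.length : Int)) true
  let groups : List (List (List Int)) := (PySem.List.pyRange 0 num_groups 1).map (fun _ => [])
  let weights : List Int := List.replicate num_groups.toNat 0  -- [0]*n ([] for n ≤ 0)
  (sorted_components.foldl stepA (groups, weights)).1

-- ===== PORT B =====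
-- _insert: insert p into a lexicographically sorted pair list, keeping order
def insPair (p : Int × Int) : List (Int × Int) → List (Int × Int)
  | [] => [p]
  | q :: t =>
      if p.1 < q.1 ∨ (p.1 = q.1 ∧ p.2 < q.2) then p :: q :: t else q :: insPair p t

-- loop body of B: (w, i) = pairs.pop(0); append; re-insert updated pair
def stepB (st : List (List (List Int)) × List (Int × Int)) (comp : List Int) :
    List (List (List Int)) × List (Int × Int) :=
  match st.2 with
  | [] => st          -- Python raises IndexError (pop from empty); excluded by Pre_
  | (w, i) :: rest =>
      (st.1.set i.toNat ((st.1.getD i.toNat []) ++ [comp]),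
       insPair (w + (comp.length : Int), i) rest)

def group_components_alt (components : List (List Int)) (num_groups : Int) :
    List (List (List Int)) :=
  let groups : List (List (List Int)) := (PySem.List.pyRange 0 num_groups 1).map (fun _ => [])
  let pairs : List (Int × Int) := (PySem.List.pyRange 0 num_groups 1).map (fun i => ((0 : Int), i))
  ((PySem.List.sorted components (fun c => (c.length : Int)) true).foldl stepB (groups, pairs)).1

-- ===== PRECONDITION & SPEC =====
-- Pre_ excludes only the inputs where A raises (ValueError: min of the empty
-- weights list, i.e. num_groups ≤ 0 with at least one component); B raises
-- there too (IndexError: pop from an empty list).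
def Pre_group_components (components : List (List Int)) (num_groups : Int) : Prop :=
  components = [] ∨ 1 ≤ num_groups
instance (components : List (List Int)) (num_groups : Int) : Decidable (Pre_group_components components num_groups) := by unfold Pre_group_components; infer_instance
def pvWitness_group_components : List (List Int) × Int := ([[1], [2, 3]], 2)

def Spec_group_components (components : List (List Int)) (num_groups : Int) (out : List (List (List Int))) : Prop := out = group_components_alt components num_groups
instance (components : List (List Int)) (num_groups : Int) (out : List (List (List Int))) : Decidable (Spec_group_components components num_groups out) := by unfold Spec_group_components; infer_instance

-- ===== CLAIM (what is proved, stated in full; the proofs are below) =====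
def Claim_equal_group_components : Prop := ∀ (components : List (List Int)) (num_groups : Int), Dom_group_components components num_groups → Pre_group_components components num_groups → Spec_group_components components num_groups (group_components components num_groups)

-- ===== LEMMAS AND PROOFS =====

-- weights list tagged with its indices: wenum ws s = [(ws[0], s), (ws[1], s+1), …]
def wenum : List Int → Int → List (Int × Int)
  | [], _ => []
  | w :: t, s => (w, s) :: wenum t (s + 1)

theorem mem_wenum_iff (ws : List Int) (s : Int) (p : Int × Int) :
    p ∈ wenum ws s ↔ ∃ (j : Nat) (h : j < ws.length), p = (ws[j], s + (j : Int)) := by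
  induction ws generalizing s with
  | nil => simp [wenum]
  | cons w t ih =>
    simp only [wenum, List.mem_cons, ih]
    constructor
    · rintro (rfl | ⟨j, hj, rfl⟩)
      · exact ⟨0, by simp, by simp⟩
      · exact ⟨j + 1, by simpa using hj, by push_cast; ring_nf; simp [add_comm, add_left_comm]⟩
    · rintro ⟨j, hj, rfl⟩
      cases j with
      | zero => left; simp
      | succ j =>
        right
        exact ⟨j, by simpa using hj, by push_cast; ring_nf; simp [add_comm, add_left_comm]⟩

theorem wenum_snd_lt (ws : List Int) (s : Int) :
    (wenum ws s).Pairwise (fun p q => p.2 < q.2) := by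
  induction ws generalizing s with
  | nil => simp [wenum]
  | cons w t ih =>
    refine List.Pairwise.cons ?_ (ih (s + 1))
    intro q hq
    rcases (mem_wenum_iff t (s + 1) q).1 hq with ⟨j, hj, rfl⟩
    simp; omega

theorem wenum_set_split (ws : List Int) (j : Nat) (v s : Int) (hj : j < ws.length) :
    ∃ L R, wenum ws s = L ++ (ws[j], s + (j : Int)) :: R ∧
           wenum (ws.set j v) s = L ++ (v, s + (j : Int)) :: R := by
  induction ws generalizing j s with
  | nil => simp at hj
  | cons w t ih =>
    cases j with
    | zero =>
      exact ⟨[], wenum t (s + 1), by simp [wenum], by simp [wenum]⟩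
    | succ j =>
      obtain ⟨L, R, h1, h2⟩ := ih j (s + 1) (by simpa using hj)
      have e : s + 1 + (j : Int) = s + ((j : Int) + 1) := by ring
      rw [e] at h1 h2
      refine ⟨(w, s) :: L, R, ?_, ?_⟩
      · simp only [wenum, h1, List.cons_append, List.getElem_cons_succ]
        push_cast
        ring_nf
      · simp only [List.set_cons_succ, wenum, h2, List.cons_append]
        push_cast
        ring_nf

theorem insPair_perm (p : Int × Int) (l : List (Int × Int)) :
    (insPair p l).Perm (p :: l) := by
  induction l with
  | nil => simp [insPair]
  | cons q t ih =>
    simp only [insPair]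
    split
    · exact List.Perm.refl _
    · exact (ih.cons q).trans (List.Perm.swap p q t)

theorem lexlt_trans {p q r : Int × Int}
    (h1 : p.1 < q.1 ∨ (p.1 = q.1 ∧ p.2 < q.2))
    (h2 : q.1 < r.1 ∨ (q.1 = r.1 ∧ q.2 < r.2)) :
    p.1 < r.1 ∨ (p.1 = r.1 ∧ p.2 < r.2) := by
  rcases h1 with h1 | ⟨h1, h1'⟩ <;> rcases h2 with h2 | ⟨h2, h2'⟩ <;> omega

theorem insPair_pairwise (p : Int × Int) (l : List (Int × Int))
    (hl : l.Pairwise (fun a b => a.1 < b.1 ∨ (a.1 = b.1 ∧ a.2 < b.2)))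
    (hne : ∀ q ∈ l, p.2 ≠ q.2) :
    (insPair p l).Pairwise (fun a b => a.1 < b.1 ∨ (a.1 = b.1 ∧ a.2 < b.2)) := by
  induction l with
  | nil => simp [insPair]
  | cons q t ih =>
    rcases List.pairwise_cons.1 hl with ⟨hq, ht⟩
    simp only [insPair]
    split
    · refine List.Pairwise.cons ?_ (List.Pairwise.cons hq ht)
      intro r hr
      rcases List.mem_cons.1 hr with rfl | hr
      · assumption
      · exact lexlt_trans (by assumption) (hq r hr)
    · refine List.Pairwise.cons ?_ (ih ht (fun r hr => hne r (List.mem_cons_of_mem q hr)))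
      intro r hr
      rcases List.mem_cons.1 (((insPair_perm p t).mem_iff).1 hr) with rfl | hr
      · have hnp := hne q (List.mem_cons_self ..)
        rename_i hnot
        omega
      · exact hq r hr

-- the relation between A's weights and B's pair list
def StInv (ws : List Int) (pairs : List (Int × Int)) : Prop :=
  pairs.Pairwise (fun a b => a.1 < b.1 ∨ (a.1 = b.1 ∧ a.2 < b.2)) ∧
  pairs.Perm (wenum ws 0)

theorem head_min (ws : List Int) (w i : Int) (rest : List (Int × Int))
    (hpw : ((w, i) :: rest).Pairwise (fun a b => a.1 < b.1 ∨ (a.1 = b.1 ∧ a.2 < b.2)))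
    (hperm : ((w, i) :: rest).Perm (wenum ws 0)) :
    ∃ (j : Nat), j < ws.length ∧ i = (j : Int) ∧ ws[j]! = w ∧
      PySem.List.min? ws (fun x => x) = some w ∧
      PySem.List.index? ws w = some j := by
  -- every element of wenum ws 0 is head-dominated
  have hdom : ∀ q ∈ wenum ws 0, (w, i) = q ∨
      ((w, i).1 < q.1 ∨ ((w, i).1 = q.1 ∧ (w, i).2 < q.2)) := by
    intro q hq
    rcases List.mem_cons.1 (hperm.mem_iff.2 hq) with h | h
    · exact Or.inl h.symm
    · exact Or.inr ((List.pairwise_cons.1 hpw).1 q h)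
  have hmemh : (w, i) ∈ wenum ws 0 := hperm.mem_iff.1 (List.mem_cons_self ..)
  rcases (mem_wenum_iff ws 0 (w, i)).1 hmemh with ⟨j, hj, hpe⟩
  have hw : ws[j] = w := by
    have := congrArg Prod.fst hpe; simpa using this.symm
  have hi : i = (j : Int) := by
    have := congrArg Prod.snd hpe; simpa using this
  refine ⟨j, hj, hi, by simp [List.getElem!_eq_getElem?_getD, List.getElem?_eq_getElem hj, hw], ?_, ?_⟩
  · -- min
    have hne : ws ≠ [] := by intro h; subst h; simp at hj
    obtain ⟨m, hm⟩ : ∃ m, PySem.List.min? ws (fun x => x) = some m := by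
      cases h : PySem.List.min? ws (fun x => x) with
      | none => exact absurd ((PySem.List.min?_eq_none_iff ws (fun x => x)).1 h) hne
      | some m => exact ⟨m, rfl⟩
    have hmmem := PySem.List.min?_mem hm
    have hmin := PySem.List.min?_isMin hm
    rcases List.mem_iff_getElem.1 hmmem with ⟨jm, hjm, hjme⟩
    have h1 : w ≤ m := by
      have := hdom (m, (jm : Int)) ((mem_wenum_iff ws 0 _).2 ⟨jm, hjm, by simp [hjme]⟩)
      rcases this with h | h | ⟨h, _⟩
      · simp [Prod.ext_iff] at h; omega
      · simpa using le_of_lt h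
      · simp at h; omega
    have h2 : m ≤ w := hmin w (hw ▸ List.getElem_mem hj)
    rw [hm, show m = w by omega]
  · -- first index of w
    have hlt : ∀ j' : Nat, j' < j → ws[j']! ≠ w := by
      intro j' hj' heq
      have hj'l : j' < ws.length := lt_trans hj' hj
      have heq' : ws[j'] = w := by
        simpa [List.getElem!_eq_getElem?_getD, List.getElem?_eq_getElem hj'l] using heq
      have := hdom (w, (j' : Int)) ((mem_wenum_iff ws 0 _).2 ⟨j', hj'l, by simp [heq']⟩)
      rcases this with h | h | ⟨_, h⟩
      · simp [Prod.ext_iff, hi] at h; omega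
      · simp at h
      · simp [hi] at h; omega
    have hmem : w ∈ ws := hw ▸ List.getElem_mem hj
    obtain ⟨k, hk⟩ : ∃ k, PySem.List.index? ws w = some k := by
      cases h : PySem.List.index? ws w with
      | none => exact absurd ((by simpa using (PySem.List.index?_eq_none_iff (xs := ws) (v := w)).1 h : w ∉ ws)) (by simpa using hmem)
      | some k => exact ⟨k, rfl⟩
    obtain ⟨hkl, hkw, hkmin⟩ := PySem.List.getElem_of_index?_eq_some hk
    have hkj : k = j := by
      by_contra hne
      rcases Nat.lt_or_ge k j with h | h
      · exact hlt k h (by simp [List.getElem!_eq_getElem?_getD, List.getElem?_eq_getElem hkl, hkw])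
      · have : j < k := by omega
        exact hkmin j this hw
    rw [hk, hkj]

theorem step_main (g : List (List (List Int))) (ws : List Int)
    (pairs : List (Int × Int)) (comp : List Int)
    (hInv : StInv ws pairs) (hne : ws ≠ []) :
    (stepA (g, ws) comp).1 = (stepB (g, pairs) comp).1 ∧
    (stepA (g, ws) comp).2.length = ws.length ∧
    StInv (stepA (g, ws) comp).2 (stepB (g, pairs) comp).2 := by
  obtain ⟨hpw, hperm⟩ := hInv
  have hwne : wenum ws 0 ≠ [] := by
    cases ws with
    | nil => exact absurd rfl hne
    | cons a t => simp [wenum]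
  have hpne : pairs ≠ [] := by
    intro h; subst h; exact hwne (hperm.nil_eq).symm
  obtain ⟨⟨w, i⟩, rest, rfl⟩ : ∃ p rest, pairs = p :: rest := by
    cases pairs with
    | nil => exact absurd rfl hpne
    | cons p rest => exact ⟨p, rest, rfl⟩
  obtain ⟨j, hj, hi, hwj, hmin, hidx⟩ := head_min ws w i rest hpw hperm
  have hwj' : ws[j] = w := by
    simpa [List.getElem!_eq_getElem?_getD, List.getElem?_eq_getElem hj] using hwj
  have hitn : i.toNat = j := by omega
  subst hi
  have hgd : ws[j]?.getD 0 = w := by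
    simp [List.getElem?_eq_getElem hj, hwj']
  -- unfold both steps
  have hA : stepA (g, ws) comp =
      (g.set j ((g.getD j []) ++ [comp]), ws.set j (w + (comp.length : Int))) := by
    have hidx' : List.idxOf? w ws = some j := by simpa using hidx
    simp [stepA, hmin, hidx', hgd, List.getD]
  have hB : stepB (g, (w, (j : Int)) :: rest) comp =
      (g.set j ((g.getD j []) ++ [comp]), insPair (w + (comp.length : Int), (j : Int)) rest) := by
    simp [stepB, hitn, List.getD]
  rw [hA, hB]
  refine ⟨rfl, by simp, ?_, ?_⟩
  · -- pairwise preserved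
    have hrest : rest.Pairwise (fun a b => a.1 < b.1 ∨ (a.1 = b.1 ∧ a.2 < b.2)) := by
      rcases hpw with _ | ⟨_, h⟩; exact h
    have hnodup : ((w, (j : Int)) :: rest).map (·.2) |>.Nodup := by
      have h1 : ((wenum ws 0).map (·.2)).Pairwise (· < ·) := by
        have := wenum_snd_lt ws 0
        exact (List.pairwise_map).2 this
      have h2 : ((wenum ws 0).map (·.2)).Nodup := h1.imp (fun h => ne_of_lt h)
      exact (hperm.map (·.2)).nodup_iff.2 h2
    have hne2 : ∀ q ∈ rest, (w + (comp.length : Int), (j : Int)).2 ≠ q.2 := by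
      rw [List.map_cons] at hnodup
      have hnotin := (List.nodup_cons.1 hnodup).1
      intro q hq h
      have hq2 : q.2 ∈ rest.map (·.2) := List.mem_map_of_mem hq
      rw [← h] at hq2
      exact hnotin hq2
    exact insPair_pairwise _ rest hrest hne2
  · -- permutation preserved
    obtain ⟨L, R, hsplit1, hsplit2⟩ := wenum_set_split ws j (w + (comp.length : Int)) 0 hj
    rw [hwj'] at hsplit1
    have hz : (0 : Int) + (j : Int) = (j : Int) := by ring
    rw [hz] at hsplit1 hsplit2
    have hLR : rest.Perm (L ++ R) :=
      (hperm.trans (by rw [hsplit1]; exact List.perm_middle)).cons_inv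
    have hstep1 : (insPair (w + (comp.length : Int), (j : Int)) rest).Perm
        ((w + (comp.length : Int), (j : Int)) :: (L ++ R)) :=
      (insPair_perm _ _).trans (hLR.cons _)
    have hstep2 : ((w + (comp.length : Int), (j : Int)) :: (L ++ R)).Perm
        (wenum (ws.set j (w + (comp.length : Int))) 0) := by
      rw [hsplit2]
      exact List.perm_middle.symm
    exact hstep1.trans hstep2

theorem fold_eq (comps : List (List Int)) :
    ∀ (g : List (List (List Int))) (ws : List Int) (pairs : List (Int × Int)),
    StInv ws pairs → ws ≠ [] →
    (comps.foldl stepA (g, ws)).1 = (comps.foldl stepB (g, pairs)).1 := by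
  induction comps with
  | nil => intro g ws pairs _ _; rfl
  | cons c t ih =>
    intro g ws pairs hInv hne
    obtain ⟨h1, h2, h3⟩ := step_main g ws pairs c hInv hne
    have hne' : (stepA (g, ws) c).2 ≠ [] := by
      intro h
      rw [h] at h2
      exact hne (List.eq_nil_of_length_eq_zero h2.symm)
    calc (List.foldl stepA (stepA (g, ws) c) t).1
        = (List.foldl stepA ((stepA (g, ws) c).1, (stepA (g, ws) c).2) t).1 := rfl
      _ = (List.foldl stepB ((stepA (g, ws) c).1, (stepB (g, pairs) c).2) t).1 :=
          ih _ _ _ h3 hne'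
      _ = (List.foldl stepB (stepB (g, pairs) c) t).1 := by rw [h1]

theorem init_pairs : ∀ (n : Nat) (a b : Int), b - a = (n : Int) →
    (PySem.List.pyRange a b 1).map (fun i => ((0 : Int), i)) = wenum (List.replicate n 0) a := by
  intro n
  induction n with
  | zero =>
    intro a b h
    rw [PySem.List.pyRange_one_eq_nil (by omega)]
    simp [wenum]
  | succ n ih =>
    intro a b h
    rw [PySem.List.pyRange_one_cons (by omega)]
    simp only [List.map_cons, List.replicate_succ, wenum]
    rw [ih (a + 1) b (by omega)]

theorem init_inv (n : Nat) : StInv (List.replicate n 0) (wenum (List.replicate n 0) 0) := by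
  constructor
  · have hfst : ∀ p ∈ wenum (List.replicate n (0 : Int)) 0, p.1 = 0 := by
      intro p hp
      rcases (mem_wenum_iff _ _ _).1 hp with ⟨j, hj, rfl⟩
      simp
    exact (wenum_snd_lt _ _).imp_of_mem (fun {a b} ha hb h =>
      Or.inr ⟨by rw [hfst a ha, hfst b hb], h⟩)
  · exact List.Perm.refl _

-- ===== VERDICT (by name: the statement is the Claim_ definition above) =====
theorem group_components_spec : Claim_equal_group_components := by
  intro components num_groups _ hpre
  unfold Spec_group_components group_components group_components_alt
  rcases eq_or_ne components [] with rfl | hcne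
  · rfl
  · have hk : 1 ≤ num_groups := by
      rcases hpre with h | h
      · exact absurd h hcne
      · exact h
    have hrep : (PySem.List.pyRange 0 num_groups 1).map (fun i => ((0 : Int), i)) =
        wenum (List.replicate num_groups.toNat 0) 0 :=
      init_pairs num_groups.toNat 0 num_groups (by omega)
    rw [hrep]
    exact fold_eq _ _ _ _ (init_inv num_groups.toNat)
      (by simp; omega)
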